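-- pv_equiv track=rewrite | github.com/xerxes168/FoodKakiBot | backend/fetch_and_enrich.py | tags_from_google_types
-- ===== SOURCE A (Python) =====
-- GOOGLE_TYPE_TO_TAG = {
--     # Dining format
--     "meal_takeaway":        "Takeaway",
--     "meal_delivery":        "Delivery",
--     "fast_food_restaurant": "Fast Food",
--     "buffet_restaurant":    "Buffet",
--     "brunch_restaurant":    "Brunch",
--     "cafe":                 "Cafe",
--     "bar":                  "Bar",
--     "wine_bar":             "Wine Bar",
--     "bakery":               "Bakery",
--     "dessert_shop":         "Dessert",
--     "ice_cream_shop":       "Ice Cream",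
--     "bubble_tea_store":     "Bubble Tea",
--     "juice_shop":           "Juice Bar",
--     "tea_house":            "Tea House",
--     "diner":                "Diner",
--     "food_court":           "Food Court",
--     "hawker_center":        "Hawker Centre",
--     # Venue type
--     "night_club":           "Nightclub",
--     "tourist_attraction":   "Tourist Spot",
--     "shopping_mall":        "In Mall",
--     # Dietary
--     "vegan_restaurant":     "Vegan",
--     "vegetarian_restaurant":"Vegetarian",
-- }
--
-- def tags_from_google_types(types: list) -> list[str]:
--     """Extract non-cuisine descriptive tags from the full types[] array."""
--     seen = set()
--     tags = []
--     for t in types: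
--         label = GOOGLE_TYPE_TO_TAG.get(t)
--         if label and label not in seen:
--             seen.add(label)
--             tags.append(label)
--     return tags
-- ===== SOURCE B (Python) =====
-- GOOGLE_TYPE_TO_TAG = {
--     "meal_takeaway":        "Takeaway",
--     "meal_delivery":        "Delivery",
--     "fast_food_restaurant": "Fast Food",
--     "buffet_restaurant":    "Buffet",
--     "brunch_restaurant":    "Brunch",
--     "cafe":                 "Cafe",
--     "bar":                  "Bar",
--     "wine_bar":             "Wine Bar",
--     "bakery":               "Bakery",
--     "dessert_shop":         "Dessert",
--     "ice_cream_shop":       "Ice Cream",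
--     "bubble_tea_store":     "Bubble Tea",
--     "juice_shop":           "Juice Bar",
--     "tea_house":            "Tea House",
--     "diner":                "Diner",
--     "food_court":           "Food Court",
--     "hawker_center":        "Hawker Centre",
--     "night_club":           "Nightclub",
--     "tourist_attraction":   "Tourist Spot",
--     "shopping_mall":        "In Mall",
--     "vegan_restaurant":     "Vegan",
--     "vegetarian_restaurant":"Vegetarian",
-- }
--
-- def tags_from_google_types(types: list) -> list[str]:
--     """Extract non-cuisine descriptive tags from the full types[] array."""
--     # Scan the constant tag table instead of the input: each mapped key present in
--     # types contributes its tag once, ordered by the key's first position in types.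
--     hits = [(types.index(k), v) for k, v in GOOGLE_TYPE_TO_TAG.items() if k in types]
--     hits.sort(key=lambda p: p[0])
--     return [v for _, v in hits]
-- ===== Notes on version B (the rewrite author's own statement) =====
-- stated objective: alternative
-- what changed: B inverts the traversal: instead of streaming over types with a seen-set, it scans the constant tag table, records each present key's first index in types, sorts the hits by that index, and reads off the tags; correct because keys and tags in the table are distinct, so a tag's first occurrence is its key's first occurrence.
import Mathlib
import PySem

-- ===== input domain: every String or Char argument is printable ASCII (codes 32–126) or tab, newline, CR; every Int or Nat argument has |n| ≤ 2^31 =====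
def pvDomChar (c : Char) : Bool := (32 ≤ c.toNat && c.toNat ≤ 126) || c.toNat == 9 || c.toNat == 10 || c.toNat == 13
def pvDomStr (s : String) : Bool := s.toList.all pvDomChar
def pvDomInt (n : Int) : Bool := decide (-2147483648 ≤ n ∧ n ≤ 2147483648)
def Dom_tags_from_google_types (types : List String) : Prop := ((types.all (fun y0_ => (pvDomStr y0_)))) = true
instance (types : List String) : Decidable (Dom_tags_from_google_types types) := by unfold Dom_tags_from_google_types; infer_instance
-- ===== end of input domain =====

-- B inverts the traversal: instead of streaming over types with a seen-set, it scans the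
-- constant tag table, records each present key's first index in types, sorts by that index
-- and reads off the tags; return values are proved equal.

def GOOGLE_TYPE_TO_TAG : PySem.Dict String String := PySem.Dict.ofList [
  ("meal_takeaway",        "Takeaway"),
  ("meal_delivery",        "Delivery"),
  ("fast_food_restaurant", "Fast Food"),
  ("buffet_restaurant",    "Buffet"),
  ("brunch_restaurant",    "Brunch"),
  ("cafe",                 "Cafe"),
  ("bar",                  "Bar"),
  ("wine_bar",             "Wine Bar"),
  ("bakery",               "Bakery"),
  ("dessert_shop",         "Dessert"),
  ("ice_cream_shop",       "Ice Cream"),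
  ("bubble_tea_store",     "Bubble Tea"),
  ("juice_shop",           "Juice Bar"),
  ("tea_house",            "Tea House"),
  ("diner",                "Diner"),
  ("food_court",           "Food Court"),
  ("hawker_center",        "Hawker Centre"),
  ("night_club",           "Nightclub"),
  ("tourist_attraction",   "Tourist Spot"),
  ("shopping_mall",        "In Mall"),
  ("vegan_restaurant",     "Vegan"),
  ("vegetarian_restaurant","Vegetarian")]

-- ===== PORT A =====
-- loop state: (seen, tags); 'if label and label not in seen' = label is a non-empty string not in seen
def tags_from_google_types (types : List String) : List String :=
  (types.foldl (fun (st : PySem.Set String × List String) t =>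
      match GOOGLE_TYPE_TO_TAG.get? t with
      | some label =>
          if !(label == "") && !(PySem.Set.contains st.1 label) then
            (PySem.Set.add st.1 label, st.2 ++ [label])
          else st
      | none => st) (PySem.Set.empty, [])).2

-- ===== PORT B =====
-- hits = [(types.index(k), v) for k, v in GOOGLE_TYPE_TO_TAG.items() if k in types]
-- hits.sort(key=lambda p: p[0]); return [v for _, v in hits]
def bHits (types : List String) : List (Nat × String) :=
  GOOGLE_TYPE_TO_TAG.items.filterMap (fun kv =>
    if types.contains kv.1 then
      (PySem.List.index? types kv.1).map (fun i => (i, kv.2))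
    else none)

def tags_from_google_types_alt (types : List String) : List String :=
  (PySem.List.sorted (bHits types) (fun p => p.1) false).map (fun p => p.2)

-- ===== PRECONDITION & SPEC =====
def Spec_tags_from_google_types (types : List String) (out : List String) : Prop := out = tags_from_google_types_alt types
instance (types : List String) (out : List String) : Decidable (Spec_tags_from_google_types types out) := by unfold Spec_tags_from_google_types; infer_instance

-- ===== CLAIM (what is proved, stated in full; the proofs are below) =====
def Claim_equal_tags_from_google_types : Prop := ∀ (types : List String), Dom_tags_from_google_types types → Spec_tags_from_google_types types (tags_from_google_types types)

-- ===== LEMMAS AND PROOFS =====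

-- every tag in the literal dict is a non-empty string, so A's truthiness test never drops a found label
theorem google_tag_ne_empty (t l : String) (h : GOOGLE_TYPE_TO_TAG.get? t = some l) :
    (l == "") = false := by
  have hall : ∀ x ∈ GOOGLE_TYPE_TO_TAG.items, (x.2 == "") = false := by decide
  exact hall _ (PySem.Dict.mem_items_of_get?_eq_some GOOGLE_TYPE_TO_TAG h)

-- A's loop invariant: seen and tags hold the same list, and the loop is Set.add over the mapped labels
theorem main_invariant (types : List String) (acc : List String) :
    (types.foldl (fun (st : PySem.Set String × List String) t =>
      match GOOGLE_TYPE_TO_TAG.get? t with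
      | some label =>
          if !(label == "") && !(PySem.Set.contains st.1 label) then
            (PySem.Set.add st.1 label, st.2 ++ [label])
          else st
      | none => st) (acc, acc)).2
    = (types.filterMap (fun t => GOOGLE_TYPE_TO_TAG.get? t)).foldl PySem.Set.add acc := by
  induction types generalizing acc with
  | nil => simp
  | cons t rest ih =>
    cases hg : GOOGLE_TYPE_TO_TAG.get? t with
    | none =>
      simp only [List.foldl_cons, List.filterMap_cons, hg]
      exact ih acc
    | some label =>
      have hne : (label == "") = false := google_tag_ne_empty t label hg
      simp only [List.foldl_cons, List.filterMap_cons, hg, hne, Bool.not_false, Bool.true_and]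
      by_cases hc : PySem.Set.contains acc label = true
      · have hm : label ∈ acc := by simpa [PySem.Set.contains] using hc
        have ha : PySem.Set.add acc label = acc := by simp [PySem.Set.add, hm]
        simp only [hc, Bool.not_true, ha]
        exact ih acc
      · have hc' : PySem.Set.contains acc label = false := by simpa using hc
        have hm : label ∉ acc := by simpa [PySem.Set.contains] using hc'
        have ha : PySem.Set.add acc label = acc ++ [label] := by simp [PySem.Set.add, hm]
        simp only [hc', Bool.not_false, ha]
        exact ih (acc ++ [label])

-- A's result is the ordered dedup of the mapped labels
theorem a_eq_dedup (types : List String) :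
    tags_from_google_types types
      = PySem.List.dedup (types.filterMap (fun t => GOOGLE_TYPE_TO_TAG.get? t)) := by
  unfold tags_from_google_types
  rw [PySem.List.dedup_eq_ofList, PySem.Set.ofList_eq_foldl]
  exact main_invariant types []

-- lookup in the literal table ↔ membership of the pair in its items
theorem get?_iff_mem_items (t v : String) :
    GOOGLE_TYPE_TO_TAG.get? t = some v ↔ (t, v) ∈ GOOGLE_TYPE_TO_TAG.items := by
  constructor
  · exact PySem.Dict.mem_items_of_get?_eq_some GOOGLE_TYPE_TO_TAG
  · intro h
    exact PySem.Dict.get?_of_mem_items GOOGLE_TYPE_TO_TAG h (by decide)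

-- the table's tags are pairwise distinct
theorem items_snd_pairwise_ne :
    GOOGLE_TYPE_TO_TAG.items.Pairwise (fun p q => p.2 ≠ q.2) := by decide

-- tags determine keys: get? is injective where defined
theorem get?_inj {t t' v : String}
    (h : GOOGLE_TYPE_TO_TAG.get? t = some v) (h' : GOOGLE_TYPE_TO_TAG.get? t' = some v) :
    t = t' := by
  have hfin : ∀ p ∈ GOOGLE_TYPE_TO_TAG.items, ∀ q ∈ GOOGLE_TYPE_TO_TAG.items,
      p.2 = q.2 → p.1 = q.1 := by decide
  exact hfin (t, v) ((get?_iff_mem_items t v).mp h) (t', v) ((get?_iff_mem_items t' v).mp h') rfl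

-- removing an element the partial map does not hit leaves filterMap unchanged
theorem filterMap_filter_none {F : String → Option String} {t : String}
    (hF : F t = none) (s : List String) :
    (s.filter (fun y => !(y == t))).filterMap F = s.filterMap F := by
  induction s with
  | nil => rfl
  | cons y ys ih =>
    by_cases hy : y = t
    · subst hy; simp [hF, ih]
    · cases hFy : F y <;> simp [hy, hFy, ih]

-- removing the unique preimage of v commutes with filterMap as removing v
theorem filterMap_filter_some {F : String → Option String} {t v : String}
    (hF : F t = some v) (hinj : ∀ y w, F y = some w → F t = some w → y = t)
    (s : List String) :
    (s.filter (fun y => !(y == t))).filterMap F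
      = (s.filterMap F).filter (fun w => !(w == v)) := by
  induction s with
  | nil => rfl
  | cons y ys ih =>
    by_cases hy : y = t
    · subst hy; simp [hF, ih]
    · cases hFy : F y with
      | none => simp [hy, hFy, ih]
      | some w =>
        have hw : w ≠ v := by
          intro hwv; subst hwv
          exact hy (hinj y w hFy (by rw [hF]))
        simp [hy, hFy, hw, ih]

-- ordered dedup commutes with an injective partial map
theorem dedup_filterMap_comm {F : String → Option String}
    (hinj : ∀ y y' w, F y = some w → F y' = some w → y = y') :
    ∀ l : List String,
      PySem.Set.ofList (l.filterMap F) = (PySem.Set.ofList l).filterMap F := by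
  intro l
  induction l with
  | nil => rfl
  | cons t l' ih =>
    rw [PySem.Set.ofList_cons]
    cases hF : F t with
    | none =>
      simp only [List.filterMap_cons, hF, ih, PySem.Set.discard]
      rw [filterMap_filter_none hF]
    | some v =>
      simp only [List.filterMap_cons, hF, PySem.Set.ofList_cons, ih, PySem.Set.discard]
      rw [filterMap_filter_some hF (fun y w hy hw => hinj y t w hy hw)]

-- a member's first index is below the length
theorem idx_lt_length {l : List String} {a : String} (ha : a ∈ l) :
    (PySem.List.index? l a).getD 0 < l.length := by
  have hs : (PySem.List.index? l a).isSome := (PySem.List.index?_isSome_iff l a).mpr ha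
  obtain ⟨k, hk⟩ := Option.isSome_iff_exists.mp hs
  obtain ⟨hlt, -, -⟩ := PySem.List.getElem_of_index?_eq_some hk
  rw [hk]
  exact hlt

-- the ordered dedup lists elements by strictly increasing first index
theorem ofList_pairwise_idx (l : List String) :
    (PySem.Set.ofList l).Pairwise
      (fun a b => (PySem.List.index? l a).getD 0 < (PySem.List.index? l b).getD 0) := by
  induction l using List.reverseRecOn with
  | nil => simp [PySem.Set.ofList]
  | append_singleton xs x ih =>
    rw [PySem.Set.ofList_append_singleton]
    by_cases hx : x ∈ PySem.Set.ofList xs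
    · rw [PySem.Set.add_of_mem hx]
      refine ih.imp_of_mem (fun {a b} ha hb hab => ?_)
      have ha' : a ∈ xs := (PySem.Set.mem_ofList xs a).mp ha
      have hb' : b ∈ xs := (PySem.Set.mem_ofList xs b).mp hb
      rwa [PySem.List.index?_append_of_mem [x] ha', PySem.List.index?_append_of_mem [x] hb']
    · rw [PySem.Set.add_of_not_mem hx]
      have hx' : x ∉ xs := fun h => hx ((PySem.Set.mem_ofList xs x).mpr h)
      rw [List.pairwise_append]
      refine ⟨?_, by simp, ?_⟩
      · refine ih.imp_of_mem (fun {a b} ha hb hab => ?_)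
        have ha' : a ∈ xs := (PySem.Set.mem_ofList xs a).mp ha
        have hb' : b ∈ xs := (PySem.Set.mem_ofList xs b).mp hb
        rwa [PySem.List.index?_append_of_mem [x] ha', PySem.List.index?_append_of_mem [x] hb']
      · intro a ha b hb
        simp only [List.mem_singleton] at hb
        have ha' : a ∈ xs := (PySem.Set.mem_ofList xs a).mp ha
        rw [hb, PySem.List.index?_append_of_mem [x] ha',
            PySem.List.index?_append_singleton_self xs x hx']
        simpa using idx_lt_length ha'

-- B's annotated list, in A's order: each deduped type, tagged with its first index
def annotated (types : List String) : List (Nat × String) :=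
  (PySem.Set.ofList types).filterMap
    (fun t => (GOOGLE_TYPE_TO_TAG.get? t).map
      (fun v => ((PySem.List.index? types t).getD 0, v)))

theorem annotated_map_snd (types : List String) :
    (annotated types).map (fun p => p.2)
      = (PySem.Set.ofList types).filterMap (fun t => GOOGLE_TYPE_TO_TAG.get? t) := by
  unfold annotated
  rw [List.map_filterMap]
  congr 1
  funext t
  cases GOOGLE_TYPE_TO_TAG.get? t <;> rfl

theorem annotated_pairwise (types : List String) :
    (annotated types).Pairwise (fun p q => p.1 < q.1) := by
  unfold annotated
  exact List.Pairwise.filterMap _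
    (fun a a' h b hb b' hb' => by
      obtain ⟨v, -, hfb⟩ := Option.map_eq_some_iff.mp hb
      obtain ⟨v', -, hfb'⟩ := Option.map_eq_some_iff.mp hb'
      subst hfb; subst hfb'
      exact h)
    (ofList_pairwise_idx types)

-- what membership in B's hit list means
theorem mem_hits_iff (types : List String) (x : Nat × String) :
    x ∈ bHits types
      ↔ ∃ t, (t, x.2) ∈ GOOGLE_TYPE_TO_TAG.items ∧ t ∈ types
              ∧ PySem.List.index? types t = some x.1 := by
  unfold bHits
  rw [List.mem_filterMap]
  constructor
  · rintro ⟨kv, hkv, hx⟩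
    by_cases hc : types.contains kv.1
    · rw [if_pos hc] at hx
      obtain ⟨i, hi, hfx⟩ := Option.map_eq_some_iff.mp hx
      subst hfx
      exact ⟨kv.1, by simpa using hkv, by simpa using hc, hi⟩
    · rw [if_neg hc] at hx; cases hx
  · rintro ⟨t, hmem, ht, hidx⟩
    refine ⟨(t, x.2), hmem, ?_⟩
    have hc : types.contains t = true := by simpa using ht
    rw [if_pos hc, hidx]
    simp

theorem mem_annotated_iff (types : List String) (x : Nat × String) :
    x ∈ annotated types
      ↔ ∃ t, (t, x.2) ∈ GOOGLE_TYPE_TO_TAG.items ∧ t ∈ types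
              ∧ PySem.List.index? types t = some x.1 := by
  unfold annotated
  rw [List.mem_filterMap]
  constructor
  · rintro ⟨t, ht, hx⟩
    obtain ⟨v, hv, hxv⟩ := Option.map_eq_some_iff.mp hx
    subst hxv
    have ht' : t ∈ types := (PySem.Set.mem_ofList types t).mp ht
    obtain ⟨k, hk⟩ := Option.isSome_iff_exists.mp
      ((PySem.List.index?_isSome_iff types t).mpr ht')
    refine ⟨t, (get?_iff_mem_items t v).mp hv, ht', ?_⟩
    rw [hk]
    rfl
  · rintro ⟨t, hmem, ht, hidx⟩
    refine ⟨t, (PySem.Set.mem_ofList types t).mpr ht, ?_⟩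
    have hv : GOOGLE_TYPE_TO_TAG.get? t = some x.2 := (get?_iff_mem_items t x.2).mpr hmem
    rw [hv, hidx]
    simp

-- B's hit list is duplicate-free (table tags are distinct)
theorem snd_of_hit (types : List String) (kv : String × String) (z : Nat × String)
    (hz : (if types.contains kv.1 then
        (PySem.List.index? types kv.1).map (fun i => (i, kv.2))
      else none) = some z) : z.2 = kv.2 := by
  by_cases hc : types.contains kv.1
  · rw [if_pos hc] at hz
    obtain ⟨i, -, hfz⟩ := Option.map_eq_some_iff.mp hz
    rw [← hfz]
  · rw [if_neg hc] at hz; cases hz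

theorem hits_nodup (types : List String) : (bHits types).Nodup := by
  unfold bHits
  refine List.Pairwise.filterMap _ (fun p q hpq x hx y hy hxy => ?_) items_snd_pairwise_ne
  apply hpq
  rw [← snd_of_hit types p x hx, hxy, snd_of_hit types q y hy]

theorem annotated_nodup (types : List String) : (annotated types).Nodup :=
  (annotated_pairwise types).imp (fun h => by intro he; subst he; exact lt_irrefl _ h)

theorem annotated_perm_hits (types : List String) :
    (annotated types).Perm (bHits types) := by
  refine (List.perm_ext_iff_of_nodup (annotated_nodup types) (hits_nodup types)).mpr ?_
  intro x
  rw [mem_annotated_iff, mem_hits_iff]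

-- ===== VERDICT (by name: the statement is the Claim_ definition above) =====
theorem tags_from_google_types_spec : Claim_equal_tags_from_google_types := by
  intro types _
  unfold Spec_tags_from_google_types tags_from_google_types_alt
  rw [PySem.List.sorted_eq_of_perm_of_pairwise_lt (bHits types) (annotated types) _ (annotated_perm_hits types)
        (annotated_pairwise types),
      annotated_map_snd, a_eq_dedup,
      PySem.List.dedup_eq_ofList,
      dedup_filterMap_comm (fun y y' w hy hy' => get?_inj hy hy')]
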